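-- pv_equiv track=rewrite | github.com/juanjoneri/Bazaar | Interview/Practice/sqr_matrix.py | has_square
-- ===== SOURCE A (Python) =====
-- def nonzero_indices(row):
--     """return a set with indices of all nonzero elements in the row"""
--     return {i for i, v in enumerate(row) if v != 0}
--
-- def has_square(matrix):
--     """return if the matrix contains a square of rectangle"""
--     indices = []
--     for row in matrix:
--         row_indices = nonzero_indices(row)
--         for previous_index in indices:
--             if len(row_indices & previous_index) >= 2:
--                 return True
--
--         indices.append(row_indices)
--
--     return False
-- ===== SOURCE B (Python) =====
-- def row_pairs(cols):
--     """all ordered pairs (cols[a], cols[b]) with a < b, built recursively"""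
--     if not cols:
--         return []
--     first, rest = cols[0], cols[1:]
--     return [(first, c) for c in rest] + row_pairs(rest)
--
-- def has_square(matrix):
--     """return if the matrix contains a square of rectangle"""
--     seen = set()
--     for row in matrix:
--         cols = [i for i, v in enumerate(row) if v != 0]
--         pairs = row_pairs(cols)
--         if any(p in seen for p in pairs):
--             return True
--         seen.update(pairs)
--     return False
-- ===== Notes on version B (the rewrite author's own statement) =====
-- stated objective: alternative
-- what changed: Instead of intersecting each new row's nonzero-index set with every previous row's set, B hashes every nonzero column pair of each row into one shared set and returns True on the first pair seen twice; it trades A's O(R^2*C) row-pair scans for O(sum of per-row pair counts) set insertions, which wins on many narrow rows but loses on wide rows.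
import Mathlib
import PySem

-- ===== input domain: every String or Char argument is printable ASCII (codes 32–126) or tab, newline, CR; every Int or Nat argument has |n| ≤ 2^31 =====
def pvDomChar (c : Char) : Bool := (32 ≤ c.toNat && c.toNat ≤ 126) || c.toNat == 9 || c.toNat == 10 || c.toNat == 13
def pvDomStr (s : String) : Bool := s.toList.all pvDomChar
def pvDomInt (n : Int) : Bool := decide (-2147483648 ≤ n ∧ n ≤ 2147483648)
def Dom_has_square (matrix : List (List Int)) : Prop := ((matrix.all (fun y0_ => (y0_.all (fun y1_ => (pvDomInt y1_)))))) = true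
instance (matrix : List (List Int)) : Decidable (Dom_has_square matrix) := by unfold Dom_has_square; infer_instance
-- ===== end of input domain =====

-- B replaces A's pairwise row-set intersections by a single hash set of nonzero column pairs,
-- returning True on the first pair seen twice: a different algorithm of comparable cost.

-- ===== PORT A =====
-- {i for i, v in enumerate(row) if v != 0}
def nonzero_indices (row : List Int) : PySem.Set Int :=
  PySem.Set.ofList (((PySem.List.enumerate row 0).filter (fun p => p.2 ≠ 0)).map (·.1))

-- the 'for row in matrix' loop with accumulator 'indices'; the inner
-- 'for previous_index in indices: if …: return True' is List.any
def has_square_loop : List (List Int) → List (PySem.Set Int) → Bool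
  | [], _ => false
  | row :: rest, indices =>
    let row_indices := nonzero_indices row
    if indices.any (fun previous_index =>
        (2 : Int) ≤ PySem.Set.len (PySem.Set.inter row_indices previous_index)) then
      true
    else
      has_square_loop rest (indices ++ [row_indices])

def has_square (matrix : List (List Int)) : Bool :=
  has_square_loop matrix []

-- ===== PORT B =====
-- row_pairs(cols): recursive list of pairs (cols[a], cols[b]) with a < b
def row_pairs : List Int → List (Int × Int)
  | [] => []
  | first :: rest => rest.map (fun c => (first, c)) ++ row_pairs rest

-- the 'for row in matrix' loop with accumulator 'seen' (a set of column pairs)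
def has_square_alt_loop : List (List Int) → PySem.Set (Int × Int) → Bool
  | [], _ => false
  | row :: rest, seen =>
    let cols := ((PySem.List.enumerate row 0).filter (fun p => p.2 ≠ 0)).map (·.1)
    let pairs := row_pairs cols
    if pairs.any (fun p => PySem.Set.contains seen p) then
      true
    else
      has_square_alt_loop rest (PySem.Set.update seen pairs)

def has_square_alt (matrix : List (List Int)) : Bool :=
  has_square_alt_loop matrix []

-- ===== PRECONDITION & SPEC =====
def Spec_has_square (matrix : List (List Int)) (out : Bool) : Prop := out = has_square_alt matrix
instance (matrix : List (List Int)) (out : Bool) : Decidable (Spec_has_square matrix out) := by unfold Spec_has_square; infer_instance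

-- ===== CLAIM (what is proved, stated in full; the proofs are below) =====
def Claim_equal_has_square : Prop := ∀ (matrix : List (List Int)), Dom_has_square matrix → Spec_has_square matrix (has_square matrix)

-- ===== LEMMAS AND PROOFS =====

-- components of a pair produced by row_pairs are members of cols
theorem mem_of_mem_row_pairs {cols : List Int} {p : Int × Int} (h : p ∈ row_pairs cols) :
    p.1 ∈ cols ∧ p.2 ∈ cols := by
  induction cols with
  | nil => simp [row_pairs] at h
  | cons c rest ih =>
    simp only [row_pairs, List.mem_append, List.mem_map] at h
    rcases h with ⟨d, hd, rfl⟩ | h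
    · exact ⟨List.mem_cons_self, List.mem_cons_of_mem _ hd⟩
    · exact ⟨List.mem_cons_of_mem _ (ih h).1, List.mem_cons_of_mem _ (ih h).2⟩

-- on a strictly increasing cols, every produced pair is strictly ordered
theorem lt_of_mem_row_pairs {cols : List Int} (hs : cols.Pairwise (· < ·))
    {p : Int × Int} (h : p ∈ row_pairs cols) : p.1 < p.2 := by
  induction cols with
  | nil => simp [row_pairs] at h
  | cons c rest ih =>
    simp only [row_pairs, List.mem_append, List.mem_map] at h
    rcases List.pairwise_cons.mp hs with ⟨hc, hrest⟩
    rcases h with ⟨d, hd, rfl⟩ | h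
    · exact hc d hd
    · exact ih hrest h

-- converse: any strictly ordered pair of members of a strictly increasing cols is produced
theorem mem_row_pairs_of {cols : List Int} (hs : cols.Pairwise (· < ·))
    {c d : Int} (hc : c ∈ cols) (hd : d ∈ cols) (hlt : c < d) : (c, d) ∈ row_pairs cols := by
  induction cols with
  | nil => simp at hc
  | cons x rest ih =>
    rcases List.pairwise_cons.mp hs with ⟨hx, hrest⟩
    simp only [row_pairs, List.mem_append, List.mem_map]
    rcases List.mem_cons.mp hc with rfl | hc'
    · left
      rcases List.mem_cons.mp hd with rfl | hd'
      · exact absurd hlt (lt_irrefl _)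
      · exact ⟨d, hd', rfl⟩
    · right
      rcases List.mem_cons.mp hd with rfl | hd'
      · exact absurd (hx c hc') (not_lt.mpr hlt.le)
      · exact ih hrest hc' hd'

-- the core row lemma: the intersection of cols with S has ≥ 2 elements
-- iff some pair of row_pairs cols lands (componentwise) in S
theorem two_le_filter_iff (cols S : List Int) :
    2 ≤ (cols.filter (fun c => S.contains c)).length ↔
      ∃ p ∈ row_pairs cols, p.1 ∈ S ∧ p.2 ∈ S := by
  induction cols with
  | nil => simp [row_pairs]
  | cons c rest ih =>
    by_cases hc : c ∈ S
    · rw [List.filter_cons_of_pos (by simpa using hc)]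
      simp only [List.length_cons, row_pairs, List.mem_append, List.mem_map]
      constructor
      · intro h
        have h1 : 0 < (rest.filter (fun x => S.contains x)).length := by omega
        rcases List.exists_mem_of_length_pos h1 with ⟨d, hd⟩
        rcases List.mem_filter.mp hd with ⟨hdr, hdS⟩
        exact ⟨(c, d), Or.inl ⟨d, hdr, rfl⟩, hc, by simpa using hdS⟩
      · rintro ⟨p, hp | hp, h1, h2⟩
        · rcases hp with ⟨d, hd, rfl⟩
          have hm : d ∈ rest.filter (fun x => S.contains x) :=
            List.mem_filter.mpr ⟨hd, by simpa using h2⟩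
          have := List.length_pos_of_mem hm
          omega
        · have hm := mem_of_mem_row_pairs hp
          have hm1 : p.1 ∈ rest.filter (fun x => S.contains x) :=
            List.mem_filter.mpr ⟨hm.1, by simpa using h1⟩
          have := List.length_pos_of_mem hm1
          omega
    · rw [List.filter_cons_of_neg (by simpa using hc), ih]
      simp only [row_pairs, List.mem_append, List.mem_map]
      constructor
      · rintro ⟨p, hp, h⟩; exact ⟨p, Or.inr hp, h⟩
      · rintro ⟨p, hp | hp, h1, h2⟩
        · rcases hp with ⟨d, hd, rfl⟩; exact absurd h1 hc
        · exact ⟨p, hp, h1, h2⟩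

-- the cols list (indices of nonzero entries) is strictly increasing
theorem cols_pairwise (row : List Int) :
    ((((PySem.List.enumerate row 0).filter (fun p => p.2 ≠ 0)).map (·.1)).Pairwise (· < ·)) := by
  apply List.Pairwise.map
  · exact fun a b h => h
  · exact List.Pairwise.filter _ (PySem.List.pairwise_lt_enumerate row 0)

-- A's nonzero_indices set is just cols itself (cols has no duplicates)
theorem nonzero_indices_eq (row : List Int) :
    nonzero_indices row = (((PySem.List.enumerate row 0).filter (fun p => p.2 ≠ 0)).map (·.1)) := by
  unfold nonzero_indices
  exact PySem.Set.ofList_eq_self_of_nodup _ (cols_pairwise row).nodup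

-- the invariant tying A's list of row-index-sets to B's set of seen pairs
def InvAcc (indices : List (PySem.Set Int)) (seen : PySem.Set (Int × Int)) : Prop :=
  ∀ p : Int × Int, p ∈ seen ↔ ∃ S ∈ indices, p.1 ∈ S ∧ p.2 ∈ S ∧ p.1 < p.2

-- the two loops agree whenever their accumulators are related by InvAcc
theorem loop_eq (matrix : List (List Int)) :
    ∀ (indices : List (PySem.Set Int)) (seen : PySem.Set (Int × Int)),
      InvAcc indices seen → has_square_loop matrix indices = has_square_alt_loop matrix seen := by
  induction matrix with
  | nil => intro _ _ _; rfl
  | cons row rest ih =>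
    intro indices seen hinv
    have hpair := cols_pairwise row
    set cols := (((PySem.List.enumerate row 0).filter (fun p => p.2 ≠ 0)).map (·.1)) with hcols
    -- the two guards are equal
    have hguard :
        (indices.any (fun S => decide ((2 : Int) ≤ PySem.Set.len (PySem.Set.inter (nonzero_indices row) S))))
          = ((row_pairs cols).any (fun p => PySem.Set.contains seen p)) := by
      rw [Bool.eq_iff_iff]
      simp only [List.any_eq_true, decide_eq_true_eq]
      constructor
      · rintro ⟨S, hS, hlen⟩
        rw [nonzero_indices_eq] at hlen
        simp only [PySem.Set.len, PySem.Set.inter, PySem.Set.contains] at hlen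
        have hlen2 : 2 ≤ (cols.filter (fun c => S.contains c)).length := by exact_mod_cast hlen
        rcases (two_le_filter_iff cols S).mp hlen2 with ⟨p, hp, h1, h2⟩
        refine ⟨p, hp, ?_⟩
        simp only [PySem.Set.contains, List.contains_iff_mem]
        exact (hinv p).mpr ⟨S, hS, h1, h2, lt_of_mem_row_pairs hpair hp⟩
      · rintro ⟨p, hp, hseen⟩
        simp only [PySem.Set.contains, List.contains_iff_mem] at hseen
        rcases (hinv p).mp hseen with ⟨S, hS, h1, h2, _⟩
        refine ⟨S, hS, ?_⟩
        rw [nonzero_indices_eq]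
        simp only [PySem.Set.len, PySem.Set.inter, PySem.Set.contains]
        exact_mod_cast (two_le_filter_iff cols S).mpr ⟨p, hp, h1, h2⟩
    have hA : has_square_loop (row :: rest) indices =
        (if (indices.any (fun S => decide ((2 : Int) ≤ PySem.Set.len (PySem.Set.inter (nonzero_indices row) S)))) = true
         then true else has_square_loop rest (indices ++ [nonzero_indices row])) := rfl
    have hB : has_square_alt_loop (row :: rest) seen =
        (if ((row_pairs cols).any (fun p => PySem.Set.contains seen p)) = true
         then true else has_square_alt_loop rest (PySem.Set.update seen (row_pairs cols))) := rfl
    rw [hA, hB, hguard]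
    by_cases hg : ((row_pairs cols).any (fun p => PySem.Set.contains seen p)) = true
    · rw [if_pos hg, if_pos hg]
    · rw [if_neg hg, if_neg hg]
      apply ih
      intro p
      rw [PySem.Set.mem_update]
      constructor
      · rintro (h | h)
        · rcases (hinv p).mp h with ⟨S, hS, hh⟩
          exact ⟨S, List.mem_append_left _ hS, hh⟩
        · refine ⟨nonzero_indices row, List.mem_append_right _ List.mem_cons_self, ?_⟩
          rw [nonzero_indices_eq]
          exact ⟨(mem_of_mem_row_pairs h).1, (mem_of_mem_row_pairs h).2,
            lt_of_mem_row_pairs hpair h⟩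
      · rintro ⟨S, hS, h1, h2, hlt⟩
        rcases List.mem_append.mp hS with hS' | hS'
        · exact Or.inl ((hinv p).mpr ⟨S, hS', h1, h2, hlt⟩)
        · right
          have hSe : S = nonzero_indices row := by simpa using hS'
          subst hSe
          rw [nonzero_indices_eq] at h1 h2
          have := mem_row_pairs_of hpair h1 h2 hlt
          simpa using this

-- ===== VERDICT (by name: the statement is the Claim_ definition above) =====
theorem has_square_spec : Claim_equal_has_square := by
  intro matrix _
  unfold Spec_has_square has_square has_square_alt
  exact loop_eq matrix [] [] (fun p => by simp)
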